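-- pv_equiv track=rewrite | github.com/Abderaouf-KHELFAOUI/Poetry | src/kattis/lv_able.py | solve
-- ===== SOURCE A (Python) =====
-- def solve(n, s):
--     s = s.strip()  # remove leading/trailing whitespace
--     if "lv" in s:
--         return 0
--
--     for i in range(n):
--         for j in range(i + 1, n + 1):
--             temp = s[:i] + s[i:j][::-1] + s[j:]
--             if "lv" in temp:
--                 return 1
--
--     if 'l' in s or 'v' in s:
--         return 1
--
--     return 1 if n >= 2 else 2
-- ===== SOURCE B (Python) =====
-- def solve(n, s):
--     s = s.strip()
--     if "lv" in s:
--         return 0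
--     if 'l' in s or 'v' in s or n >= 2:
--         return 1
--     return 2
-- ===== Notes on version B (the rewrite author's own statement) =====
-- stated objective: faster
-- what changed: Dropped the O(n^3) nested loop over all substring reversals: the loop can only return 1 when 'l' or 'v' occurs in s, and the later presence check already returns 1 then, so the answer reduces to three O(len(s)) membership tests.
import Mathlib
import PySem

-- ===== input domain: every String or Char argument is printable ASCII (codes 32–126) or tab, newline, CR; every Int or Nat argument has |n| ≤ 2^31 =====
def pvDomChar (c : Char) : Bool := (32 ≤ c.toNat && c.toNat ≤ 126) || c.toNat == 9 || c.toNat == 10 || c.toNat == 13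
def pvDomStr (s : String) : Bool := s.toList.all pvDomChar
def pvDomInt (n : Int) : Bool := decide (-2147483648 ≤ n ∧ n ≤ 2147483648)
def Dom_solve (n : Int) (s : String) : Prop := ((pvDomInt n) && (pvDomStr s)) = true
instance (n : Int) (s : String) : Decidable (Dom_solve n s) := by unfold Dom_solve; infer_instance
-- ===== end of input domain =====

-- B drops A's O(n^3) reversal scan: that scan can only return 1 when 'l' or 'v' is in s,
-- in which case the later membership check returns 1 anyway.

-- ===== PORT A =====
-- temp = s[:i] + s[i:j][::-1] + s[j:]
def solveTemp (t : List Char) (i j : Int) : List Char :=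
  PySem.List.slice t none (some i)
    ++ (PySem.List.slice t (some i) (some j)).reverse
    ++ PySem.List.slice t (some j) none

def solve (n : Int) (s : String) : Int :=
  let t := PySem.Chars.strip s.toList
  if PySem.Chars.isIn ['l', 'v'] t then 0
  else if (PySem.List.pyRange 0 n 1).any (fun i =>
            (PySem.List.pyRange (i + 1) (n + 1) 1).any (fun j =>
              PySem.Chars.isIn ['l', 'v'] (solveTemp t i j)))
  then 1
  else if PySem.Chars.isIn ['l'] t || PySem.Chars.isIn ['v'] t then 1
  else if n ≥ 2 then 1 else 2

-- ===== PORT B =====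
def solve_alt (n : Int) (s : String) : Int :=
  let t := PySem.Chars.strip s.toList
  if PySem.Chars.isIn ['l', 'v'] t then 0
  else if PySem.Chars.isIn ['l'] t || PySem.Chars.isIn ['v'] t || n ≥ 2 then 1
  else 2

-- ===== PRECONDITION & SPEC =====
def Spec_solve (n : Int) (s : String) (out : Int) : Prop := out = solve_alt n s
instance (n : Int) (s : String) (out : Int) : Decidable (Spec_solve n s out) := by unfold Spec_solve; infer_instance

-- ===== CLAIM (what is proved, stated in full; the proofs are below) =====
def Claim_equal_solve : Prop := ∀ (n : Int) (s : String), Dom_solve n s → Spec_solve n s (solve n s)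

-- ===== LEMMAS AND PROOFS =====

-- The only temp with n = 1 is i = 0, j = 1, and there temp = t.
lemma solveTemp_zero_one (t : List Char) : solveTemp t 0 1 = t := by
  unfold solveTemp
  have h0 : PySem.List.slice t none (some (0 : Int)) = t.take 0 := PySem.List.slice_to t (by omega)
  have h1 : PySem.List.slice t (some (0 : Int)) (some (1 : Int)) = (t.drop 0).take 1 :=
    PySem.List.slice_toNat t (by omega) (by omega)
  have h2 : PySem.List.slice t (some (1 : Int)) none = t.drop 1 := PySem.List.slice_from t (by omega)
  rw [h0, h1, h2]
  cases t with
  | nil => simp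
  | cons a l => simp

-- The nested loop never fires when n < 2 and "lv" is not in t.
lemma loop_false_of_small (t : List Char) (n : Int) (hn : n < 2)
    (hlv : PySem.Chars.isIn ['l', 'v'] t = false) :
    (PySem.List.pyRange 0 n 1).any (fun i =>
      (PySem.List.pyRange (i + 1) (n + 1) 1).any (fun j =>
        PySem.Chars.isIn ['l', 'v'] (solveTemp t i j))) = false := by
  by_cases h1 : n ≤ 0
  · rw [PySem.List.pyRange_one_eq_nil h1]
    rfl
  · have hn1 : n = 1 := by omega
    subst hn1
    have ho : PySem.List.pyRange (0 : Int) 1 1 = [0] := PySem.List.pyRange_one_singleton 0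
    have hi : PySem.List.pyRange (0 + 1 : Int) (1 + 1) 1 = [1] := PySem.List.pyRange_one_singleton 1
    simp only [ho, List.any_cons, List.any_nil]
    simp only [hi, List.any_cons, List.any_nil]
    rw [solveTemp_zero_one, hlv]
    rfl

-- ===== VERDICT (by name: the statement is the Claim_ definition above) =====
theorem solve_spec : Claim_equal_solve := by
  intro n s _
  unfold Spec_solve solve solve_alt
  set t := PySem.Chars.strip s.toList with ht
  cases h0 : PySem.Chars.isIn ['l', 'v'] t with
  | true => simp [h0]
  | false =>
    by_cases hn2 : n ≥ 2
    · by_cases hloop : ((PySem.List.pyRange 0 n 1).any (fun i =>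
          (PySem.List.pyRange (i + 1) (n + 1) 1).any (fun j =>
            PySem.Chars.isIn ['l', 'v'] (solveTemp t i j)))) = true
      · cases hl : PySem.Chars.isIn ['l'] t <;> cases hv : PySem.Chars.isIn ['v'] t <;>
          simp [h0, hl, hv, hn2, hloop]
      · cases hl : PySem.Chars.isIn ['l'] t <;> cases hv : PySem.Chars.isIn ['v'] t <;>
          simp [h0, hl, hv, hn2, hloop]
    · have hlf := loop_false_of_small t n (by omega) h0
      cases hl : PySem.Chars.isIn ['l'] t <;> cases hv : PySem.Chars.isIn ['v'] t <;>
        simp [h0, hl, hv, hn2, hlf]
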